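-- pv_equiv track=rewrite | github.com/BurstBooksPublishing/Bare-Metal-Computing-With-X64 | source_code/Chapter - AI as Machine Code Author/Section - Machine Code Synthesis/Subsection - Stack discipline enforcement/stackverifier.py | verify_stack_discipline
-- ===== SOURCE A (Python) =====
-- def verify_stack_discipline(instrs, init_rsp=0):
--     rsp = init_rsp
--     stack_ok = True
--     path_checks = []
--     for i, ins in enumerate(instrs):
--         op, arg = ins
--         if op == 'push':
--             rsp -= 8
--         elif op == 'pop':
--             rsp += 8
--         elif op == 'sub_rsp':
--             rsp -= int(arg)  # arg in bytes
--         elif op == 'add_rsp':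
--             rsp += int(arg)
--         elif op == 'call':
--             # enforce pre-call alignment: RSP ≡ 0 (mod 16)
--             if (rsp % 16) != 0:
--                 stack_ok = False
--                 path_checks.append((i, rsp, 'misaligned before call'))
--             # call will push return address
--             rsp -= 8
--         elif op == 'ret':
--             # before ret, RSP should equal initial unless nested returns allowed
--             if rsp != init_rsp:
--                 stack_ok = False
--                 path_checks.append((i, rsp, 'unbalanced at ret'))
--             # return conceptually transfers control; keep sim simple
--         else:
--             raise ValueError('unsupported op '+op)
--     return stack_ok, path_checks
-- ===== SOURCE B (Python) =====
-- def _delta(op, arg):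
--     # rsp delta of one instruction; raises on unsupported op like A does
--     if op in ('push', 'call'):
--         return -8
--     if op == 'pop':
--         return 8
--     if op == 'sub_rsp':
--         return -int(arg)
--     if op == 'add_rsp':
--         return int(arg)
--     if op == 'ret':
--         return 0
--     raise ValueError('unsupported op ' + op)
--
--
-- def verify_stack_discipline(instrs, init_rsp=0):
--     # pass 1: rsp value immediately before each instruction
--     traj = []
--     rsp = init_rsp
--     for op, arg in instrs:
--         traj.append(rsp)
--         rsp += _delta(op, arg)
--     # pass 2: collect violations from the trajectory
--     path_checks = []
--     for i, (op, _) in enumerate(instrs):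
--         if op == 'call' and traj[i] % 16 != 0:
--             path_checks.append((i, traj[i], 'misaligned before call'))
--         elif op == 'ret' and traj[i] != init_rsp:
--             path_checks.append((i, traj[i], 'unbalanced at ret'))
--     return not path_checks, path_checks
-- ===== Notes on version B (the rewrite author's own statement) =====
-- stated objective: alternative
-- what changed: B replaces A's single stateful pass (rsp + stack_ok mutated together) with a delta table plus two passes: first build the trajectory of pre-instruction rsp values, then scan the trajectory for call/ret violations and derive stack_ok as emptiness of the violation list.
import Mathlib
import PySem

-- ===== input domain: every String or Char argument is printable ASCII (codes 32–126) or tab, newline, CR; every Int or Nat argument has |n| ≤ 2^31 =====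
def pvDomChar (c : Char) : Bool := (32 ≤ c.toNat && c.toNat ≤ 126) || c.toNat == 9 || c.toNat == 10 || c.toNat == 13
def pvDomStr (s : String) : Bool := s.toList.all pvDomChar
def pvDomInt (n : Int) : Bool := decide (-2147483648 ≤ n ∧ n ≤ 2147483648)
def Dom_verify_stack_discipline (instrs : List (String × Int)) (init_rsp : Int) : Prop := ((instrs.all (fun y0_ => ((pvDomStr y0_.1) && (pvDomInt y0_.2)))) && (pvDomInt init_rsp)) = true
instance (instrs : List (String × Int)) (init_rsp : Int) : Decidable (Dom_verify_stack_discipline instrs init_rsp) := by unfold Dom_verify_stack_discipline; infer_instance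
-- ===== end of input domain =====

-- B verifies stack discipline in two passes (trajectory of pre-instruction rsp values, then a
-- violation scan) instead of A's single stateful pass; equivalence proved on inputs whose ops
-- are all supported (A raises ValueError otherwise).


-- ===== PORT A =====
-- A's loop: state (rsp, stack_ok, path_checks), index i; `none` = the ValueError branch.
def pvGoA (init_rsp : Int) : List (String × Int) → Int → Int → Bool → List (Int × Int × String) →
    Option (Bool × List (Int × Int × String))
  | [], _, _, ok, checks => some (ok, checks)
  | (op, arg) :: rest, i, rsp, ok, checks =>
    if op == "push" then pvGoA init_rsp rest (i + 1) (rsp - 8) ok checks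
    else if op == "pop" then pvGoA init_rsp rest (i + 1) (rsp + 8) ok checks
    else if op == "sub_rsp" then pvGoA init_rsp rest (i + 1) (rsp - arg) ok checks
    else if op == "add_rsp" then pvGoA init_rsp rest (i + 1) (rsp + arg) ok checks
    else if op == "call" then
      if PySem.Int.mod rsp 16 != 0 then
        pvGoA init_rsp rest (i + 1) (rsp - 8) false (checks ++ [(i, rsp, "misaligned before call")])
      else pvGoA init_rsp rest (i + 1) (rsp - 8) ok checks
    else if op == "ret" then
      if rsp != init_rsp then
        pvGoA init_rsp rest (i + 1) rsp false (checks ++ [(i, rsp, "unbalanced at ret")])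
      else pvGoA init_rsp rest (i + 1) rsp ok checks
    else none  -- raise ValueError

def verify_stack_discipline (instrs : List (String × Int)) (init_rsp : Int) :
    Bool × (List (Int × Int × String)) :=
  (pvGoA init_rsp instrs 0 init_rsp true []).getD (false, [])  -- default unreachable under Pre_

-- ===== PORT B =====
-- _delta: rsp delta of one instruction; `none` = the ValueError branch.
def pvDelta (op : String) (arg : Int) : Option Int :=
  if op == "push" || op == "call" then some (-8)
  else if op == "pop" then some 8
  else if op == "sub_rsp" then some (-arg)
  else if op == "add_rsp" then some arg
  else if op == "ret" then some 0
  else none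

-- pass 1: rsp value immediately before each instruction
def pvTraj : List (String × Int) → Int → Option (List Int)
  | [], _ => some []
  | (op, arg) :: rest, rsp =>
    match pvDelta op arg with
    | none => none
    | some d => (pvTraj rest (rsp + d)).map (fun t => rsp :: t)

-- pass 2: collect violations from the trajectory (instrs and traj walked in step, i the index)
def pvChecks (init_rsp : Int) : List (String × Int) → List Int → Int → List (Int × Int × String)
  | (op, _) :: rest, r :: rs, i =>
    if op == "call" && (PySem.Int.mod r 16 != 0) then
      (i, r, "misaligned before call") :: pvChecks init_rsp rest rs (i + 1)
    else if op == "ret" && (r != init_rsp) then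
      (i, r, "unbalanced at ret") :: pvChecks init_rsp rest rs (i + 1)
    else pvChecks init_rsp rest rs (i + 1)
  | _, _, _ => []

def verify_stack_discipline_alt (instrs : List (String × Int)) (init_rsp : Int) :
    Bool × (List (Int × Int × String)) :=
  match pvTraj instrs init_rsp with
  | none => (false, [])  -- default unreachable under Pre_
  | some traj =>
    let path_checks := pvChecks init_rsp instrs traj 0
    (path_checks.isEmpty, path_checks)

-- ===== PRECONDITION & SPEC =====
-- Pre_ excludes exactly the inputs containing an unsupported opcode, on which A raises ValueError.
def Pre_verify_stack_discipline (instrs : List (String × Int)) (init_rsp : Int) : Prop :=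
  ∀ p ∈ instrs, p.1 ∈ ["push", "pop", "sub_rsp", "add_rsp", "call", "ret"]
instance (instrs : List (String × Int)) (init_rsp : Int) : Decidable (Pre_verify_stack_discipline instrs init_rsp) := by unfold Pre_verify_stack_discipline; infer_instance

def pvWitness_verify_stack_discipline : (List (String × Int)) × Int :=
  ([("call", 0), ("push", 0), ("sub_rsp", 8), ("ret", 0)], 16)

def Spec_verify_stack_discipline (instrs : List (String × Int)) (init_rsp : Int) (out : Bool × (List (Int × Int × String))) : Prop := out = verify_stack_discipline_alt instrs init_rsp
instance (instrs : List (String × Int)) (init_rsp : Int) (out : Bool × (List (Int × Int × String))) : Decidable (Spec_verify_stack_discipline instrs init_rsp out) := by unfold Spec_verify_stack_discipline; infer_instance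

-- ===== CLAIM (what is proved, stated in full; the proofs are below) =====
def Claim_equal_verify_stack_discipline : Prop := ∀ (instrs : List (String × Int)) (init_rsp : Int), Dom_verify_stack_discipline instrs init_rsp → Pre_verify_stack_discipline instrs init_rsp → Spec_verify_stack_discipline instrs init_rsp (verify_stack_discipline instrs init_rsp)

-- ===== LEMMAS AND PROOFS =====

-- total trajectory (proof helper): the rsp prefix values, with unsupported ops treated as delta 0
def pvTr : List (String × Int) → Int → List Int
  | [], _ => []
  | (op, arg) :: rest, rsp => rsp :: pvTr rest (rsp + (pvDelta op arg).getD 0)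

theorem pvTraj_eq_tr (instrs : List (String × Int)) (rsp : Int)
    (h : ∀ p ∈ instrs, p.1 ∈ ["push", "pop", "sub_rsp", "add_rsp", "call", "ret"]) :
    pvTraj instrs rsp = some (pvTr instrs rsp) := by
  induction instrs generalizing rsp with
  | nil => rfl
  | cons hd tl ih =>
    obtain ⟨op, arg⟩ := hd
    have hop := h (op, arg) (List.mem_cons_self ..)
    have htl : ∀ p ∈ tl, p.1 ∈ ["push", "pop", "sub_rsp", "add_rsp", "call", "ret"] :=
      fun p hp => h p (List.mem_cons_of_mem _ hp)
    have hd : pvDelta op arg ≠ none := by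
      simp only [List.mem_cons, List.not_mem_nil, or_false] at hop
      rcases hop with h | h | h | h | h | h <;> simp [pvDelta, h]
    rcases hx : pvDelta op arg with _ | d
    · exact absurd hx hd
    · simp [pvTraj, pvTr, hx, ih _ htl]

theorem pvGoA_eq (init_rsp : Int) (instrs : List (String × Int)) (i rsp : Int) (ok : Bool)
    (checks : List (Int × Int × String))
    (h : ∀ p ∈ instrs, p.1 ∈ ["push", "pop", "sub_rsp", "add_rsp", "call", "ret"]) :
    pvGoA init_rsp instrs i rsp ok checks =
      some (ok && (pvChecks init_rsp instrs (pvTr instrs rsp) i).isEmpty,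
        checks ++ pvChecks init_rsp instrs (pvTr instrs rsp) i) := by
  induction instrs generalizing i rsp ok checks with
  | nil => simp [pvGoA, pvTr, pvChecks]
  | cons hd tl ih =>
    obtain ⟨op, arg⟩ := hd
    have hop := h (op, arg) (List.mem_cons_self ..)
    have htl : ∀ p ∈ tl, p.1 ∈ ["push", "pop", "sub_rsp", "add_rsp", "call", "ret"] :=
      fun p hp => h p (List.mem_cons_of_mem _ hp)
    simp only [List.mem_cons, List.not_mem_nil, or_false] at hop
    rcases hop with h1 | h1 | h1 | h1 | h1 | h1
    all_goals subst h1
    · -- push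
      simpa [pvGoA, pvTr, pvChecks, pvDelta, sub_eq_add_neg] using ih (i + 1) (rsp - 8) ok checks htl
    · -- pop
      simpa [pvGoA, pvTr, pvChecks, pvDelta] using ih (i + 1) (rsp + 8) ok checks htl
    · -- sub_rsp
      simpa [pvGoA, pvTr, pvChecks, pvDelta, sub_eq_add_neg] using ih (i + 1) (rsp - arg) ok checks htl
    · -- add_rsp
      simpa [pvGoA, pvTr, pvChecks, pvDelta] using ih (i + 1) (rsp + arg) ok checks htl
    · -- call
      by_cases hc : (16:Int) ∣ rsp
      · simpa [pvGoA, pvTr, pvChecks, pvDelta, hc, sub_eq_add_neg] using ih (i + 1) (rsp - 8) ok checks htl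
      · simpa [pvGoA, pvTr, pvChecks, pvDelta, hc, sub_eq_add_neg] using
          ih (i + 1) (rsp - 8) false (checks ++ [(i, rsp, "misaligned before call")]) htl
    · -- ret
      by_cases hc : rsp = init_rsp
      · simpa [pvGoA, pvTr, pvChecks, pvDelta, hc] using ih (i + 1) rsp ok checks htl
      · simpa [pvGoA, pvTr, pvChecks, pvDelta, hc] using
          ih (i + 1) rsp false (checks ++ [(i, rsp, "unbalanced at ret")]) htl

-- ===== VERDICT (by name: the statement is the Claim_ definition above) =====
theorem verify_stack_discipline_spec : Claim_equal_verify_stack_discipline := by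
  intro instrs init_rsp _ hpre
  unfold Spec_verify_stack_discipline verify_stack_discipline verify_stack_discipline_alt
  rw [pvTraj_eq_tr instrs init_rsp hpre, pvGoA_eq init_rsp instrs 0 init_rsp true [] hpre]
  simp
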